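-- pv_equiv track=rewrite | github.com/jiangzf93/od-solution-python | C_3_password/solution.py | solve
-- ===== SOURCE A (Python) =====
-- def solve(str):
--     realStr = ''
--     for s in str:
--         if s == '<':
--             realStr = realStr[:-1]
--         else:
--             realStr += s
--     if len(realStr) < 8:
--         return realStr + ',false'
--     hasUpper = False
--     hasLower = False
--     hasDigit = False
--     hasOther = False
--     for s in realStr:
--         if s.isupper():
--             hasUpper = True
--         elif s.islower():
--             hasLower = True
--         elif s.isdigit():
--             hasDigit = True
--         else:
--             hasOther = True
--     if hasUpper and hasLower and hasDigit and hasOther: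
--         return realStr + ',true'
--     else:
--         return realStr + ',false'
-- ===== SOURCE B (Python) =====
-- def solve(str):
--     kept = []
--     skip = 0
--     mask = 0
--     for c in reversed(str):
--         if c == '<':
--             skip += 1
--         elif skip:
--             skip -= 1
--         else:
--             kept.append(c)
--             mask |= 1 << (0 if c.isupper() else 1 if c.islower() else 2 if c.isdigit() else 3)
--     real = ''.join(reversed(kept))
--     verdict = ',true' if len(real) >= 8 and mask == 15 else ',false'
--     return real + verdict
-- ===== Notes on version B (the rewrite author's own statement) =====
-- stated objective: alternative
-- what changed: B makes a single right-to-left pass with a pending-backspace counter (instead of A's forward string rebuilding via slicing/concatenation) and accumulates a category bitmask in that same pass (instead of A's separate four-flag loop), deciding validity by mask == 15.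
import Mathlib
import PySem

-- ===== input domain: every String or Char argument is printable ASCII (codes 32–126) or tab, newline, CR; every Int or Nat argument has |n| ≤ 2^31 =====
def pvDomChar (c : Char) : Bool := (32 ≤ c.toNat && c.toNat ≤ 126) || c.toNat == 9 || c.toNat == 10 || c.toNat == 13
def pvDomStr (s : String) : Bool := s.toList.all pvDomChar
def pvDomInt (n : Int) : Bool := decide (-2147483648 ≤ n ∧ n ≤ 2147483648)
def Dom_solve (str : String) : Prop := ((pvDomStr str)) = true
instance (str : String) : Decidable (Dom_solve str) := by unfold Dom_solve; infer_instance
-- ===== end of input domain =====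

-- B traverses the string ONCE, right to left, with a pending-backspace counter and a category
-- bitmask built in the same pass, instead of A's forward string rebuilding plus a second flag
-- loop (objective: alternative; return value only, no mutation).

-- ===== PORT A =====
-- for s in str: realStr = realStr[:-1] if s == '<' else realStr + s
def solveEdit : List Char → List Char → List Char
  | real, [] => real
  | real, s :: rest =>
    if s == '<' then solveEdit (PySem.List.slice real none (some (-1))) rest
    else solveEdit (real ++ [s]) rest

-- the second loop accumulating (hasUpper, hasLower, hasDigit, hasOther)
def solveFlags : Bool × Bool × Bool × Bool → List Char → Bool × Bool × Bool × Bool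
  | f, [] => f
  | (u, l, d, o), s :: rest =>
    if PySem.Chars.isupper s then solveFlags (true, l, d, o) rest
    else if PySem.Chars.islower s then solveFlags (u, true, d, o) rest
    else if PySem.Chars.isdigit s then solveFlags (u, l, true, o) rest
    else solveFlags (u, l, d, true) rest

def solve (str : String) : String :=
  let real := solveEdit [] str.toList
  if real.length < 8 then String.ofList (real ++ ",false".toList)
  else
    let f := solveFlags (false, false, false, false) real
    if f.1 && f.2.1 && f.2.2.1 && f.2.2.2 then String.ofList (real ++ ",true".toList)
    else String.ofList (real ++ ",false".toList)

-- ===== PORT B =====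
-- 0 if c.isupper() else 1 if c.islower() else 2 if c.isdigit() else 3
def catIdx (c : Char) : Nat :=
  if PySem.Chars.isupper c then 0
  else if PySem.Chars.islower c then 1
  else if PySem.Chars.isdigit c then 2
  else 3

-- the single loop over reversed(str), state (kept, skip, mask); kept.append = ++ [c]
def altLoop : List Char × Nat × Nat → List Char → List Char × Nat × Nat
  | st, [] => st
  | (kept, skip, mask), c :: rest =>
    if c == '<' then altLoop (kept, skip + 1, mask) rest
    else if skip ≠ 0 then altLoop (kept, skip - 1, mask) rest
    else altLoop (kept ++ [c], skip, mask ||| (1 <<< catIdx c)) rest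

def solve_alt (str : String) : String :=
  let st := altLoop ([], 0, 0) str.toList.reverse
  let real := st.1.reverse          -- ''.join(reversed(kept))
  let verdict := if decide (8 ≤ real.length) && decide (st.2.2 = 15) then ",true" else ",false"
  String.ofList (real ++ verdict.toList)

-- ===== PRECONDITION & SPEC =====
def Spec_solve (str : String) (out : String) : Prop := out = solve_alt str
instance (str : String) (out : String) : Decidable (Spec_solve str out) := by unfold Spec_solve; infer_instance

-- ===== CLAIM =====
def Claim_equal_solve : Prop := ∀ (str : String), Dom_solve str → Spec_solve str (solve str)

-- ===== LEMMAS AND PROOFS =====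

-- one step of B's loop body, and B's loop re-expressed as FRONT recursion on the original string
def stepB (st : List Char × Nat × Nat) (c : Char) : List Char × Nat × Nat :=
  if c == '<' then (st.1, st.2.1 + 1, st.2.2)
  else if st.2.1 ≠ 0 then (st.1, st.2.1 - 1, st.2.2)
  else (st.1 ++ [c], st.2.1, st.2.2 ||| (1 <<< catIdx c))

def backrec : List Char → List Char × Nat × Nat
  | [] => ([], 0, 0)
  | c :: cs => stepB (backrec cs) c

theorem altLoop_cons (st : List Char × Nat × Nat) (c : Char) (l : List Char) :
    altLoop st (c :: l) = altLoop (stepB st c) l := by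
  obtain ⟨k, s, m⟩ := st
  simp only [altLoop, stepB]
  split_ifs <;> rfl

theorem altLoop_append (st : List Char × Nat × Nat) (l : List Char) (c : Char) :
    altLoop st (l ++ [c]) = stepB (altLoop st l) c := by
  induction l generalizing st with
  | nil => exact altLoop_cons st c []
  | cons a t ih => rw [List.cons_append, altLoop_cons, altLoop_cons, ih]

theorem altLoop_eq_backrec (cs : List Char) :
    altLoop ([], 0, 0) cs.reverse = backrec cs := by
  induction cs with
  | nil => rfl
  | cons c t ih => rw [List.reverse_cons, altLoop_append, ih]; rfl

def dropLastN : Nat → List Char → List Char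
  | 0, l => l
  | n + 1, l => dropLastN n l.dropLast

theorem dropLastN_nil (n : Nat) : dropLastN n [] = [] := by
  induction n with
  | zero => rfl
  | succ k ih => simpa [dropLastN] using ih

-- A's forward edit loop computed from B's backward state
theorem edit_eq_backrec (cs : List Char) (real : List Char) :
    solveEdit real cs = dropLastN (backrec cs).2.1 real ++ (backrec cs).1.reverse := by
  induction cs generalizing real with
  | nil => simp [solveEdit, backrec, dropLastN]
  | cons c t ih =>
    simp only [solveEdit, PySem.List.slice_to_neg_one, backrec, stepB]
    by_cases hc : c = '<'
    · simp only [hc, beq_self_eq_true, if_true, ih]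
      rfl
    · have hc' : (c == '<') = false := by simp [hc]
      simp only [hc', Bool.false_eq_true, if_false, ih]
      by_cases hk : (backrec t).2.1 ≠ 0
      · obtain ⟨j, hj⟩ : ∃ j, (backrec t).2.1 = j + 1 :=
          ⟨(backrec t).2.1 - 1, by omega⟩
        simp [hj, dropLastN]
      · simp only [hk, if_false]
        simp only [ne_eq, not_not] at hk
        simp [hk, dropLastN]

-- B's mask in terms of the four "any" category tests on the kept characters
def maskSpec (l : List Char) : Nat :=
  (if l.any PySem.Chars.isupper then 1 else 0) |||
  (if l.any PySem.Chars.islower then 2 else 0) |||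
  (if l.any PySem.Chars.isdigit then 4 else 0) |||
  (if l.any (fun c => !(PySem.Chars.isupper c || PySem.Chars.islower c || PySem.Chars.isdigit c)) then 8 else 0)

theorem low_of_up (c : Char) (h : PySem.Chars.isupper c = true) :
    PySem.Chars.islower c = false ∧ PySem.Chars.isdigit c = false := by
  simp only [PySem.Chars.isupper, PySem.Chars.islower, PySem.Chars.isdigit,
    Bool.and_eq_true, Bool.and_eq_false_iff, decide_eq_true_eq, decide_eq_false_iff_not,
    Char.le_def, UInt32.le_iff_toNat_le,
    show 'A'.val.toNat = 65 from rfl, show 'Z'.val.toNat = 90 from rfl,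
    show 'a'.val.toNat = 97 from rfl, show 'z'.val.toNat = 122 from rfl,
    show '0'.val.toNat = 48 from rfl, show '9'.val.toNat = 57 from rfl] at *
  omega

theorem dig_of_low (c : Char) (h : PySem.Chars.islower c = true) :
    PySem.Chars.isdigit c = false := by
  simp only [PySem.Chars.islower, PySem.Chars.isdigit,
    Bool.and_eq_true, Bool.and_eq_false_iff, decide_eq_true_eq, decide_eq_false_iff_not,
    Char.le_def, UInt32.le_iff_toNat_le,
    show 'a'.val.toNat = 97 from rfl, show 'z'.val.toNat = 122 from rfl,
    show '0'.val.toNat = 48 from rfl, show '9'.val.toNat = 57 from rfl] at *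
  omega

theorem maskSpec_append (l : List Char) (c : Char) :
    maskSpec (l ++ [c]) = maskSpec l ||| (1 <<< catIdx c) := by
  simp only [maskSpec, catIdx, List.any_append, List.any_cons, List.any_nil, Bool.or_false]
  by_cases hu : PySem.Chars.isupper c = true
  · obtain ⟨h1, h2⟩ := low_of_up c hu
    simp only [hu, h1, h2]
    cases h3 : l.any PySem.Chars.isupper <;>
    cases h4 : l.any PySem.Chars.islower <;>
    cases h5 : l.any PySem.Chars.isdigit <;>
    cases h6 : l.any (fun c => !(PySem.Chars.isupper c || PySem.Chars.islower c || PySem.Chars.isdigit c)) <;>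
    simp
  · simp only [Bool.not_eq_true] at hu
    by_cases hl : PySem.Chars.islower c = true
    · have h2 := dig_of_low c hl
      simp only [hu, hl, h2]
      cases h3 : l.any PySem.Chars.isupper <;>
      cases h4 : l.any PySem.Chars.islower <;>
      cases h5 : l.any PySem.Chars.isdigit <;>
      cases h6 : l.any (fun c => !(PySem.Chars.isupper c || PySem.Chars.islower c || PySem.Chars.isdigit c)) <;>
      simp
    · simp only [Bool.not_eq_true] at hl
      by_cases hd : PySem.Chars.isdigit c = true
      · simp only [hu, hl, hd]
        cases h3 : l.any PySem.Chars.isupper <;>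
        cases h4 : l.any PySem.Chars.islower <;>
        cases h5 : l.any PySem.Chars.isdigit <;>
        cases h6 : l.any (fun c => !(PySem.Chars.isupper c || PySem.Chars.islower c || PySem.Chars.isdigit c)) <;>
        simp
      · simp only [Bool.not_eq_true] at hd
        simp only [hu, hl, hd]
        cases h3 : l.any PySem.Chars.isupper <;>
        cases h4 : l.any PySem.Chars.islower <;>
        cases h5 : l.any PySem.Chars.isdigit <;>
        cases h6 : l.any (fun c => !(PySem.Chars.isupper c || PySem.Chars.islower c || PySem.Chars.isdigit c)) <;>
        simp

theorem mask_eq_maskSpec (cs : List Char) :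
    (backrec cs).2.2 = maskSpec (backrec cs).1 := by
  induction cs with
  | nil => rfl
  | cons c t ih =>
    simp only [backrec, stepB]
    split_ifs <;> simp [ih, maskSpec_append]

theorem flags_eq (cs : List Char) (u l d o : Bool) :
    solveFlags (u, l, d, o) cs =
      (u || cs.any PySem.Chars.isupper, l || cs.any PySem.Chars.islower,
       d || cs.any PySem.Chars.isdigit,
       o || cs.any (fun c => !(PySem.Chars.isupper c || PySem.Chars.islower c || PySem.Chars.isdigit c))) := by
  induction cs generalizing u l d o with
  | nil => simp [solveFlags]
  | cons c rest ih =>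
    simp only [solveFlags, List.any_cons]
    by_cases hu : PySem.Chars.isupper c = true
    · obtain ⟨h1, h2⟩ := low_of_up c hu
      simp [hu, h1, h2, ih]
    · simp only [Bool.not_eq_true] at hu
      by_cases hl : PySem.Chars.islower c = true
      · have h2 := dig_of_low c hl
        simp [hu, hl, h2, ih]
      · simp only [Bool.not_eq_true] at hl
        by_cases hd : PySem.Chars.isdigit c = true
        · simp [hu, hl, hd, ih]
        · simp only [Bool.not_eq_true] at hd
          simp [hu, hl, hd, ih]

-- ===== VERDICT =====
theorem mask15_iff (a b c d : Bool) :
    decide ((((if a = true then (1 : Nat) else 0) ||| if b = true then 2 else 0) |||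
      if c = true then 4 else 0) ||| (if d = true then 8 else 0) = 15) = (a && b && c && d) := by
  cases a <;> cases b <;> cases c <;> cases d <;> decide

theorem solve_spec : Claim_equal_solve := by
  intro str _
  unfold Spec_solve solve solve_alt
  have hedit : solveEdit [] str.toList = (backrec str.toList).1.reverse := by
    rw [edit_eq_backrec, dropLastN_nil, List.nil_append]
  simp only [altLoop_eq_backrec, hedit, mask_eq_maskSpec, flags_eq, Bool.false_or,
    List.any_reverse, List.length_reverse, maskSpec, mask15_iff]
  set r := (backrec str.toList).1 with hr
  by_cases hlen : r.length < 8
  · have h8 : decide (8 ≤ r.length) = false := by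
      simp only [decide_eq_false_iff_not]; omega
    simp only [if_pos hlen, h8, Bool.false_and, Bool.false_eq_true, if_false]
  · have h8 : decide (8 ≤ r.length) = true := by
      simp only [decide_eq_true_eq]; omega
    rw [if_neg hlen, h8, Bool.true_and]
    split_ifs <;> rfl
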